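-- pv_equiv track=rewrite | github.com/Gayathri-33/wanderwise-ai | app.py | select_personalized_attractions
-- ===== SOURCE A (Python) =====
-- def select_personalized_attractions(dest_data, interests, day, total_days):
--     """Select attractions based on user interests"""
--     attractions = dest_data['attractions'].copy()
--
--     # Prioritize based on interests
--     if 'culture' in interests or 'history' in interests:
--         cultural_attractions = [a for a in attractions if any(word in a.lower() for word in ['museum', 'cathedral', 'palace', 'temple', 'shrine'])]
--         attractions = cultural_attractions + [a for a in attractions if a not in cultural_attractions]
--
--     if 'adventure' in interests:
--         adventure_attractions = [a for a in attractions if any(word in a.lower() for word in ['tower', 'bridge', 'cruise', 'skytree'])]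
--         attractions = adventure_attractions + [a for a in attractions if a not in adventure_attractions]
--
--     # Select 2-3 attractions per day
--     attractions_per_day = min(3, len(attractions) // total_days + 1)
--     start_idx = day * attractions_per_day
--     end_idx = start_idx + attractions_per_day
--
--     return attractions[start_idx:end_idx] if end_idx <= len(attractions) else attractions[start_idx:]
-- ===== SOURCE B (Python) =====
-- def select_personalized_attractions(dest_data, interests, day, total_days):
--     """Select attractions based on user interests (single-pass bucket partition)"""
--     want_culture = 'culture' in interests or 'history' in interests
--     want_adventure = 'adventure' in interests
--     buckets = [[], [], [], []]
--     for a in dest_data['attractions']: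
--         low = a.lower()
--         c = want_culture and any(w in low for w in ('museum', 'cathedral', 'palace', 'temple', 'shrine'))
--         adv = want_adventure and any(w in low for w in ('tower', 'bridge', 'cruise', 'skytree'))
--         buckets[(0 if adv else 2) + (0 if c else 1)].append(a)
--     attractions = buckets[0] + buckets[1] + buckets[2] + buckets[3]
--
--     attractions_per_day = min(3, len(attractions) // total_days + 1)
--     start_idx = day * attractions_per_day
--     end_idx = start_idx + attractions_per_day
--     return attractions[start_idx:end_idx] if end_idx <= len(attractions) else attractions[start_idx:]
-- ===== Notes on version B (the rewrite author's own statement) =====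
-- stated objective: faster
-- what changed: Replaces A's two partition passes, each of which rescans the matched sublist with a quadratic 'a not in matches' membership test, by a single linear pass that drops every attraction into one of four priority buckets and concatenates them; the slice arithmetic is unchanged.
-- outside the precondition, e.g. on select_personalized_attractions({}, ['culture'], 0, 2): A raises KeyError, B raises KeyError; on select_personalized_attractions({'attractions': ['Museum']}, [], 0, 0): A raises ZeroDivisionError, B raises ZeroDivisionError
import Mathlib
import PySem

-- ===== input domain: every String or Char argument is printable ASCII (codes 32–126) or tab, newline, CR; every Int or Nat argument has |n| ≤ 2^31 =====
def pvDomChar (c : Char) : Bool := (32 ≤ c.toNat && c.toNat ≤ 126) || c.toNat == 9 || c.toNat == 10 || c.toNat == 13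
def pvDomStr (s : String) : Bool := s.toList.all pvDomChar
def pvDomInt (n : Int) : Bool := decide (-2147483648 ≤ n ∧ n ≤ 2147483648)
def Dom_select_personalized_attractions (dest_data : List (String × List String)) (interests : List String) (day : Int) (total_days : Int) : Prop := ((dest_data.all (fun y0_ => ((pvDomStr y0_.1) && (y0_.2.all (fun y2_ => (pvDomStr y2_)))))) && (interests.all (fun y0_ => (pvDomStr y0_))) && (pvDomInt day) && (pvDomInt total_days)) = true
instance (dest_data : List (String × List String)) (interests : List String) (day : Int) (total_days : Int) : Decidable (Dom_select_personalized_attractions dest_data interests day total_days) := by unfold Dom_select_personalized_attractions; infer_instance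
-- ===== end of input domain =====

-- B replaces A's two partition passes (each of which rescans the matched sublist via `a not in …`)
-- by a single pass that drops every attraction into one of four priority buckets; objective: faster
-- by algorithm (asymptotics per claim.json; not measured). Return value only.

-- ===== PORT A =====
-- A's two keyword lists, as literals
def pvCultWords : List String := ["museum", "cathedral", "palace", "temple", "shrine"]
def pvAdvWords : List String := ["tower", "bridge", "cruise", "skytree"]

def select_personalized_attractions (dest_data : List (String × List String)) (interests : List String) (day : Int) (total_days : Int) : List String :=
  -- dest_data['attractions'] ; Pre_ guarantees the key is present (getD [] is dead outside Pre_)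
  let attractions0 := ((PySem.Dict.mk dest_data).get? "attractions").getD []
  let attractions1 :=
    if interests.contains "culture" || interests.contains "history" then
      let cultural := attractions0.filter (fun a => pvCultWords.any (fun w => PySem.Str.isIn w (PySem.Str.lower a)))
      cultural ++ attractions0.filter (fun a => !(cultural.contains a))
    else attractions0
  let attractions2 :=
    if interests.contains "adventure" then
      let adventure := attractions1.filter (fun a => pvAdvWords.any (fun w => PySem.Str.isIn w (PySem.Str.lower a)))
      adventure ++ attractions1.filter (fun a => !(adventure.contains a))
    else attractions1
  let attractions_per_day := min 3 (PySem.Int.floordiv (attractions2.length : Int) total_days + 1)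
  let start_idx := day * attractions_per_day
  let end_idx := start_idx + attractions_per_day
  if end_idx ≤ (attractions2.length : Int) then PySem.List.slice attractions2 (some start_idx) (some end_idx)
  else PySem.List.slice attractions2 (some start_idx) none

-- ===== PORT B =====
def select_personalized_attractions_alt (dest_data : List (String × List String)) (interests : List String) (day : Int) (total_days : Int) : List String :=
  let want_culture := interests.contains "culture" || interests.contains "history"
  let want_adventure := interests.contains "adventure"
  let bs := (((PySem.Dict.mk dest_data).get? "attractions").getD []).foldl
    (fun (acc : List String × List String × List String × List String) a =>
      let low := PySem.Str.lower a
      let c := want_culture && (pvCultWords.any (fun w => PySem.Str.isIn w low))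
      let adv := want_adventure && (pvAdvWords.any (fun w => PySem.Str.isIn w low))
      if adv then
        if c then (acc.1 ++ [a], acc.2.1, acc.2.2.1, acc.2.2.2)
        else (acc.1, acc.2.1 ++ [a], acc.2.2.1, acc.2.2.2)
      else
        if c then (acc.1, acc.2.1, acc.2.2.1 ++ [a], acc.2.2.2)
        else (acc.1, acc.2.1, acc.2.2.1, acc.2.2.2 ++ [a]))
    ([], [], [], [])
  let attractions := bs.1 ++ bs.2.1 ++ bs.2.2.1 ++ bs.2.2.2
  let attractions_per_day := min 3 (PySem.Int.floordiv (attractions.length : Int) total_days + 1)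
  let start_idx := day * attractions_per_day
  let end_idx := start_idx + attractions_per_day
  if end_idx ≤ (attractions.length : Int) then PySem.List.slice attractions (some start_idx) (some end_idx)
  else PySem.List.slice attractions (some start_idx) none

-- ===== PRECONDITION & SPEC =====
-- Pre_ excludes exactly the inputs where the Python A raises: a missing 'attractions' key (KeyError)
-- and total_days = 0 (ZeroDivisionError).
def Pre_select_personalized_attractions (dest_data : List (String × List String)) (interests : List String) (day : Int) (total_days : Int) : Prop :=
  ((PySem.Dict.mk dest_data).get? "attractions").isSome = true ∧ total_days ≠ 0
instance (dest_data : List (String × List String)) (interests : List String) (day : Int) (total_days : Int) : Decidable (Pre_select_personalized_attractions dest_data interests day total_days) := by unfold Pre_select_personalized_attractions; infer_instance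

def pvWitness_select_personalized_attractions : (List (String × List String)) × List String × Int × Int :=
  ([("attractions", ["Modern Museum", "Sky Tower", "Old Park"])], ["culture", "adventure"], 0, 2)

def Spec_select_personalized_attractions (dest_data : List (String × List String)) (interests : List String) (day : Int) (total_days : Int) (out : List String) : Prop := out = select_personalized_attractions_alt dest_data interests day total_days
instance (dest_data : List (String × List String)) (interests : List String) (day : Int) (total_days : Int) (out : List String) : Decidable (Spec_select_personalized_attractions dest_data interests day total_days out) := by unfold Spec_select_personalized_attractions; infer_instance

-- ===== CLAIM (what is proved, stated in full; the proofs are below) =====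
def Claim_equal_select_personalized_attractions : Prop := ∀ (dest_data : List (String × List String)) (interests : List String) (day : Int) (total_days : Int), Dom_select_personalized_attractions dest_data interests day total_days → Pre_select_personalized_attractions dest_data interests day total_days → Spec_select_personalized_attractions dest_data interests day total_days (select_personalized_attractions dest_data interests day total_days)

-- ===== LEMMAS AND PROOFS =====

-- A's second comprehension `[a for a in xs if a not in xs-filtered]` is the complementary filter
theorem filter_not_contains_filter (p : String → Bool) (L : List String) :
    L.filter (fun a => !((L.filter p).contains a)) = L.filter (fun a => !p a) := by
  apply List.filter_congr
  intro a ha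
  by_cases h : p a = true <;> simp [List.mem_filter, ha, h]

-- B's bucket fold, characterised by four filters
theorem foldl_buckets (p q : String → Bool) (L b0 b1 b2 b3 : List String) :
    L.foldl
      (fun (acc : List String × List String × List String × List String) a =>
        if q a then
          if p a then (acc.1 ++ [a], acc.2.1, acc.2.2.1, acc.2.2.2)
          else (acc.1, acc.2.1 ++ [a], acc.2.2.1, acc.2.2.2)
        else
          if p a then (acc.1, acc.2.1, acc.2.2.1 ++ [a], acc.2.2.2)
          else (acc.1, acc.2.1, acc.2.2.1, acc.2.2.2 ++ [a]))
      (b0, b1, b2, b3)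
    = (b0 ++ L.filter (fun a => q a && p a), b1 ++ L.filter (fun a => q a && !p a),
       b2 ++ L.filter (fun a => !q a && p a), b3 ++ L.filter (fun a => !q a && !p a)) := by
  induction L generalizing b0 b1 b2 b3 with
  | nil => simp
  | cons x xs ih =>
    by_cases hq : q x = true <;> by_cases hp : p x = true <;>
      simp [List.foldl_cons, hq, hp, ih, List.append_assoc]

-- the reordered attraction lists of A (two partition passes) and B (one bucket pass) coincide
theorem lists_eq (wc wa : Bool) (p q : String → Bool) (L : List String) :
    (if wa then
      (if wc then L.filter p ++ L.filter (fun a => !((L.filter p).contains a)) else L).filter q ++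
      (if wc then L.filter p ++ L.filter (fun a => !((L.filter p).contains a)) else L).filter
        (fun a => !(((if wc then L.filter p ++ L.filter (fun a => !((L.filter p).contains a)) else L).filter q).contains a))
     else (if wc then L.filter p ++ L.filter (fun a => !((L.filter p).contains a)) else L))
    = ((L.foldl
        (fun (acc : List String × List String × List String × List String) a =>
          if wa && q a then
            if wc && p a then (acc.1 ++ [a], acc.2.1, acc.2.2.1, acc.2.2.2)
            else (acc.1, acc.2.1 ++ [a], acc.2.2.1, acc.2.2.2)
          else
            if wc && p a then (acc.1, acc.2.1, acc.2.2.1 ++ [a], acc.2.2.2)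
            else (acc.1, acc.2.1, acc.2.2.1, acc.2.2.2 ++ [a]))
        ([], [], [], [])).1 ++
       (L.foldl
        (fun (acc : List String × List String × List String × List String) a =>
          if wa && q a then
            if wc && p a then (acc.1 ++ [a], acc.2.1, acc.2.2.1, acc.2.2.2)
            else (acc.1, acc.2.1 ++ [a], acc.2.2.1, acc.2.2.2)
          else
            if wc && p a then (acc.1, acc.2.1, acc.2.2.1 ++ [a], acc.2.2.2)
            else (acc.1, acc.2.1, acc.2.2.1, acc.2.2.2 ++ [a]))
        ([], [], [], [])).2.1 ++
       (L.foldl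
        (fun (acc : List String × List String × List String × List String) a =>
          if wa && q a then
            if wc && p a then (acc.1 ++ [a], acc.2.1, acc.2.2.1, acc.2.2.2)
            else (acc.1, acc.2.1 ++ [a], acc.2.2.1, acc.2.2.2)
          else
            if wc && p a then (acc.1, acc.2.1, acc.2.2.1 ++ [a], acc.2.2.2)
            else (acc.1, acc.2.1, acc.2.2.1, acc.2.2.2 ++ [a]))
        ([], [], [], [])).2.2.1 ++
       (L.foldl
        (fun (acc : List String × List String × List String × List String) a =>
          if wa && q a then
            if wc && p a then (acc.1 ++ [a], acc.2.1, acc.2.2.1, acc.2.2.2)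
            else (acc.1, acc.2.1 ++ [a], acc.2.2.1, acc.2.2.2)
          else
            if wc && p a then (acc.1, acc.2.1, acc.2.2.1 ++ [a], acc.2.2.2)
            else (acc.1, acc.2.1, acc.2.2.1, acc.2.2.2 ++ [a]))
        ([], [], [], [])).2.2.2) := by
  rw [foldl_buckets (fun a => wc && p a) (fun a => wa && q a) L [] [] [] []]
  simp only [List.nil_append, filter_not_contains_filter]
  cases wc <;> cases wa <;>
    simp [List.filter_append, List.filter_filter, Bool.and_comm, List.append_assoc]

-- both full return expressions, for abstract flags/predicates: rewrite the list, the tail is identical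
theorem ports_eq (wc wa : Bool) (p q : String → Bool) (L : List String) (day td : Int) :
    (let L1 := if wc then L.filter p ++ L.filter (fun a => !((L.filter p).contains a)) else L
     let L2 := if wa then L1.filter q ++ L1.filter (fun a => !((L1.filter q).contains a)) else L1
     let per := min 3 (PySem.Int.floordiv (L2.length : Int) td + 1)
     let s := day * per
     let e := s + per
     if e ≤ (L2.length : Int) then PySem.List.slice L2 (some s) (some e)
     else PySem.List.slice L2 (some s) none)
    = (let bs := L.foldl
        (fun (acc : List String × List String × List String × List String) a =>
          if wa && q a then
            if wc && p a then (acc.1 ++ [a], acc.2.1, acc.2.2.1, acc.2.2.2)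
            else (acc.1, acc.2.1 ++ [a], acc.2.2.1, acc.2.2.2)
          else
            if wc && p a then (acc.1, acc.2.1, acc.2.2.1 ++ [a], acc.2.2.2)
            else (acc.1, acc.2.1, acc.2.2.1, acc.2.2.2 ++ [a]))
        ([], [], [], [])
       let attractions := bs.1 ++ bs.2.1 ++ bs.2.2.1 ++ bs.2.2.2
       let per := min 3 (PySem.Int.floordiv (attractions.length : Int) td + 1)
       let s := day * per
       let e := s + per
       if e ≤ (attractions.length : Int) then PySem.List.slice attractions (some s) (some e)
       else PySem.List.slice attractions (some s) none) := by
  simp only []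
  rw [lists_eq wc wa p q L]

-- ===== VERDICT (by name: the statement is the Claim_ definition above) =====
theorem select_personalized_attractions_spec : Claim_equal_select_personalized_attractions := by
  intro dest_data interests day total_days _hDom _hPre
  unfold Spec_select_personalized_attractions
  unfold select_personalized_attractions select_personalized_attractions_alt
  exact ports_eq (interests.contains "culture" || interests.contains "history")
    (interests.contains "adventure")
    (fun a => pvCultWords.any (fun w => PySem.Str.isIn w (PySem.Str.lower a)))
    (fun a => pvAdvWords.any (fun w => PySem.Str.isIn w (PySem.Str.lower a)))
    (((PySem.Dict.mk dest_data).get? "attractions").getD []) day total_days
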